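-- pv_equiv track=rewrite | github.com/spinje/pflow | src/pflow/cli/mcp.py | _group_tools_by_server
-- ===== SOURCE A (Python) =====
-- def _group_tools_by_server(tool_names: list[str]) -> dict[str, list[str]]:
--     """Group tool names by their server prefix."""
--     tools_by_server: dict[str, list[str]] = {}
--     for tool_name in tool_names:
--         parts = tool_name.split("-", 2)
--         if len(parts) >= 3:
--             server_name = parts[1]
--             if server_name not in tools_by_server:
--                 tools_by_server[server_name] = []
--             tools_by_server[server_name].append(tool_name)
--     return tools_by_server
-- ===== SOURCE B (Python) =====
-- def _group_tools_by_server(tool_names: list[str]) -> dict[str, list[str]]: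
--     """Group tool names by their server prefix."""
--     pairs = [
--         (parts[1], t)
--         for t in tool_names
--         for parts in [t.split("-", 2)]
--         if len(parts) >= 3
--     ]
--     servers = dict.fromkeys(s for s, _ in pairs)
--     return {s: [t for s2, t in pairs if s2 == s] for s in servers}
-- ===== Notes on version B (the rewrite author's own statement) =====
-- stated objective: alternative
-- what changed: Replaces A's single-pass dict accumulation with a three-stage pipeline: build the (server, tool) pair list once, deduplicate the server keys in first-occurrence order, then emit each group by a per-key scan of the pair list.
import Mathlib
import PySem

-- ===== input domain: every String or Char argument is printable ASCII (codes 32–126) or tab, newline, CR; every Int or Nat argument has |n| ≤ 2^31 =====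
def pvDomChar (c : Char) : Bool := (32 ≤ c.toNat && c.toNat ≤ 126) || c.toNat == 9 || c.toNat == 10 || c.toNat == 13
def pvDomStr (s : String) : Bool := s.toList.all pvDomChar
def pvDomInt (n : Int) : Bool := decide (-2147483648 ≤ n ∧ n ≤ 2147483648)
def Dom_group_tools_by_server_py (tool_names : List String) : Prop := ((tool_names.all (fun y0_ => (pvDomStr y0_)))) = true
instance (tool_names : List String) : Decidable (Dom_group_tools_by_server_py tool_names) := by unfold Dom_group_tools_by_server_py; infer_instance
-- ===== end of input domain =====

-- B replaces A's one-pass dict accumulation by a pair-list / key-dedup / per-key-scan pipeline (alternative decomposition, not faster).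

-- ===== PORT A =====
-- one loop iteration of A: split, length test, insert-if-absent, append
def pvStepA (d : PySem.Dict String (List String)) (tool_name : String) :
    PySem.Dict String (List String) :=
  match PySem.Str.splitMax? tool_name "-" 2 with
  | some parts =>
      if 3 ≤ parts.length then
        (if d.contains (parts.getD 1 "") then d
         else d.insert (parts.getD 1 "") []).modify (parts.getD 1 "") [] (· ++ [tool_name])
      else d
  | none => d

def group_tools_by_server_py (tool_names : List String) : List (String × List String) :=
  (tool_names.foldl pvStepA PySem.Dict.empty).items

-- ===== PORT B =====
-- the (server_name, tool_name) pair for tools whose split('-', 2) has ≥ 3 parts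
def pvPairOf (t : String) : Option (String × String) :=
  match PySem.Str.splitMax? t "-" 2 with
  | some parts => if 3 ≤ parts.length then some (parts.getD 1 "", t) else none
  | none => none

def group_tools_by_server_py_alt (tool_names : List String) : List (String × List String) :=
  let pairs := tool_names.filterMap pvPairOf
  let servers := PySem.Set.ofList (pairs.map (·.1))
  servers.map (fun s => (s, (pairs.filter (fun p => p.1 == s)).map (·.2)))

-- ===== PRECONDITION & SPEC =====
def Spec_group_tools_by_server_py (tool_names : List String) (out : List (String × List String)) : Prop := out = group_tools_by_server_py_alt tool_names
instance (tool_names : List String) (out : List (String × List String)) : Decidable (Spec_group_tools_by_server_py tool_names out) := by unfold Spec_group_tools_by_server_py; infer_instance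

-- ===== CLAIM (what is proved, stated in full; the proofs are below) =====
def Claim_equal_group_tools_by_server_py : Prop := ∀ (tool_names : List String), Dom_group_tools_by_server_py tool_names → Spec_group_tools_by_server_py tool_names (group_tools_by_server_py tool_names)

-- ===== LEMMAS AND PROOFS =====

-- A's conditional insert-then-append is a single Python-style modify
theorem pvStepA_eq_modify (d : PySem.Dict String (List String)) (t : String) :
    pvStepA d t = match pvPairOf t with
      | some p => d.modify p.1 [] (· ++ [p.2])
      | none => d := by
  unfold pvStepA pvPairOf
  cases h : PySem.Str.splitMax? t "-" 2 with
  | none => rfl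
  | some parts =>
      dsimp only
      by_cases h3 : 3 ≤ parts.length
      · simp only [if_pos h3]
        by_cases hc : d.contains (parts.getD 1 "") = true
        · rw [if_pos hc]
        · simp only [Bool.not_eq_true] at hc
          rw [if_neg (by simp only [Bool.not_eq_true]; exact hc)]
          rw [PySem.Dict.modify, PySem.Dict.modify, PySem.Dict.insert_insert_self,
              PySem.Dict.getD_insert_self, PySem.Dict.getD_of_not_contains d [] hc]
      · simp only [if_neg h3]

-- A's fold over tool_names is the modify-fold over the filtered pair list
theorem pvFoldA_eq (l : List String) (d : PySem.Dict String (List String)) :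
    l.foldl pvStepA d =
      (l.filterMap pvPairOf).foldl (fun d p => d.modify p.1 [] (· ++ [p.2])) d := by
  induction l generalizing d with
  | nil => rfl
  | cons t l ih =>
      simp only [List.foldl_cons, List.filterMap_cons, pvStepA_eq_modify]
      cases h : pvPairOf t with
      | none => simp [ih]
      | some p => simp [ih]

-- ===== VERDICT (by name: the statement is the Claim_ definition above) =====

theorem group_tools_by_server_py_spec : Claim_equal_group_tools_by_server_py := by
  intro tool_names _
  unfold Spec_group_tools_by_server_py group_tools_by_server_py group_tools_by_server_py_alt
  rw [pvFoldA_eq]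
  set pairs := tool_names.filterMap pvPairOf with hp
  have hkeys :
      ((pairs.foldl (fun d p => d.modify p.1 [] (· ++ [p.2])) PySem.Dict.empty).keys : List String)
        = PySem.Set.ofList (pairs.map (·.1)) := by
    rw [PySem.Dict.keys_foldl_modify_key pairs (·.1) [] (fun _ p => (· ++ [p.2])) PySem.Dict.empty]
    simp [PySem.Dict.keys_empty, PySem.Set.update_nil_left]
  have hnd :
      ((pairs.foldl (fun d p => d.modify p.1 [] (· ++ [p.2])) PySem.Dict.empty).keys : List String).Nodup := by
    exact PySem.Dict.nodup_keys_foldl_modify_key pairs (·.1) [] (fun _ p => (· ++ [p.2]))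
      PySem.Dict.empty (by simp [PySem.Dict.keys_empty])
  rw [PySem.Dict.items_eq_map_keys _ hnd [], hkeys]
  refine List.map_congr_left ?_
  intro s _
  have := PySem.Dict.getD_foldl_modify_append pairs PySem.Dict.empty s
  simp only [PySem.Dict.getD_empty, List.nil_append] at this
  simp [this]
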